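-- pv_equiv track=rewrite | github.com/Nano112/Paint_it_black | sources/table_de_verite.py | clauses
-- ===== SOURCE A (Python) =====
-- def combinliste(seq, k):
--     p = []
--     imax = 2**len(seq)
--     for i in range(imax):
--         s = []
--         jmax =len(seq)
--         for j in range(jmax):
--             if (i>>j)&1==1:##>> -> diviser x par 2**y
--                 s.append(seq[j])
--         if len(s)==k:
--             p.append(s)
--     return p
--
-- def clauses(chiffre,i):
--     n=len(chiffre)
--     chiffrenegatif=[]
--     for j in chiffre:
--         chiffrenegatif.append(-j)
--     positif=n-(i-1)##nombre de variables dans les clauses "positives"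
--     negatif=i+1##nombre de variables dans les clauses "negatives"
--     clausepositive=combinliste(chiffre,positif)
--     clausenegative=combinliste(chiffrenegatif,negatif)
--
--     return (clausepositive,clausenegative)
-- ===== SOURCE B (Python) =====
-- def combos(seq, k):
--     # all size-k subsets of seq, in increasing-bitmask order, via a size-indexed DP
--     if k < 0 or k > len(seq):
--         return []
--     rows = [[[]]] + [[] for _ in range(k)]
--     for x in seq:
--         rows = [rows[0]] + [cur + [c + [x] for c in prev]
--                             for prev, cur in zip(rows, rows[1:])]
--     return rows[k]
--
-- def clauses(chiffre, i):
--     n = len(chiffre)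
--     positif = n - (i - 1)
--     negatif = i + 1
--     return (combos(chiffre, positif), combos([-j for j in chiffre], negatif))
-- ===== Notes on version B (the rewrite author's own statement) =====
-- stated objective: alternative
-- what changed: Replaces the enumerate-all-2^n-bitmasks-and-filter-by-size subset generator with a size-indexed dynamic programming pass (rows[s] = all size-s subsets of the processed prefix, in the same increasing-bitmask order), returning rows[k]; work is proportional to the subsets kept rather than to 2^n.
import Mathlib
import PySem

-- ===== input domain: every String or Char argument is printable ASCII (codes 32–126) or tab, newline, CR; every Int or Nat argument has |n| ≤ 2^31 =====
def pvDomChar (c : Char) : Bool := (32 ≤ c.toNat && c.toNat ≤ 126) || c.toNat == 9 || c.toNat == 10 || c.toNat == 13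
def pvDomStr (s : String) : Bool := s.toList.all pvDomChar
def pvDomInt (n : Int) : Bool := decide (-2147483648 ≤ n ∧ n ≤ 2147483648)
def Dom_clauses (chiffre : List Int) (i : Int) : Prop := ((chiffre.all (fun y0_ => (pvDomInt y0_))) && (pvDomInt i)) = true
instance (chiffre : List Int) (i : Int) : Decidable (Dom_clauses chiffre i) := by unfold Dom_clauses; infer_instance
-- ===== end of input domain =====

-- B replaces A's enumerate-all-2^n-bitmasks-and-filter-by-size subset generator by a
-- size-indexed DP (rows[s] = size-s subsets of the processed prefix, same order); objective: alternative.

-- ===== PORT A =====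
-- Python: p = []; for i in range(2**len(seq)): s = [elements whose bit is set]; if len(s)==k: p.append(s)
-- (i>>j)&1 : j comes from range(len(seq)) so j ≥ 0 and j.toNat is exact; seq[j] is in range,
-- ported as pyGet? …, whose .toList is the single appended element.
def combinliste (seq : List Int) (k : Int) : List (List Int) :=
  let imax : Int := 2 ^ seq.length
  (PySem.List.pyRange 0 imax 1).foldl (fun p i =>
    let jmax : Int := (seq.length : Int)
    let s := (PySem.List.pyRange 0 jmax 1).foldl (fun s j =>
      if PySem.Int.band (i >>> j.toNat) 1 = 1 then s ++ (PySem.List.pyGet? seq j).toList else s)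
      ([] : List Int)
    if (s.length : Int) = k then p ++ [s] else p) []

def clauses (chiffre : List Int) (i : Int) : List (List Int) × List (List Int) :=
  let n : Int := (chiffre.length : Int)
  let chiffrenegatif := chiffre.foldl (fun acc j => acc ++ [-j]) ([] : List Int)
  let positif := n - (i - 1)
  let negatif := i + 1
  (combinliste chiffre positif, combinliste chiffrenegatif negatif)

-- ===== PORT B =====
-- rows = [rows[0]] + [cur + [c + [x] for c in prev] for prev, cur in zip(rows, rows[1:])]
def combosStep (x : Int) (rows : List (List (List Int))) : List (List (List Int)) :=
  match rows with
  | [] => []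
  | r0 :: rest =>
      r0 :: List.zipWith (fun prev cur => cur ++ prev.map (fun c => c ++ [x])) (r0 :: rest) rest

def combos (seq : List Int) (k : Int) : List (List Int) :=
  if k < 0 ∨ (seq.length : Int) < k then []
  else
    let init : List (List (List Int)) := [[]] :: List.replicate k.toNat []
    let rows := seq.foldl (fun rows x => combosStep x rows) init
    rows.getD k.toNat []

def clauses_alt (chiffre : List Int) (i : Int) : List (List Int) × List (List Int) :=
  let n : Int := (chiffre.length : Int)
  let positif := n - (i - 1)
  let negatif := i + 1
  (combos chiffre positif, combos (chiffre.map (fun j => -j)) negatif)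

-- ===== PRECONDITION & SPEC =====
def Spec_clauses (chiffre : List Int) (i : Int) (out : List (List Int) × List (List Int)) : Prop := out = clauses_alt chiffre i
instance (chiffre : List Int) (i : Int) (out : List (List Int) × List (List Int)) : Decidable (Spec_clauses chiffre i out) := by unfold Spec_clauses; infer_instance

-- ===== CLAIM (what is proved, stated in full; the proofs are below) =====
def Claim_equal_clauses : Prop := ∀ (chiffre : List Int) (i : Int), Dom_clauses chiffre i → Spec_clauses chiffre i (clauses chiffre i)

-- ===== LEMMAS AND PROOFS =====

/-- The subset of `seq` selected by bitmask `m`, in index order. -/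
def subsN (seq : List Int) (m : Nat) : List Int :=
  ((List.range seq.length).filter (fun j => m.testBit j)).map (fun j => seq.getD j 0)

theorem bit_cond (m j : Nat) : (PySem.Int.band ((m : Int) >>> j) 1 = 1) ↔ m.testBit j := by
  rw [← Int.natCast_shiftRight]
  rw [show ((1:Int) = ((1:Nat):Int)) from rfl, PySem.Int.band_natCast]
  rw [Nat.cast_inj, Nat.and_one_is_mod, Nat.testBit, Nat.one_and_eq_mod_two]
  cases Nat.mod_two_eq_zero_or_one (m >>> j) with
  | inl h => simp [h]
  | inr h => simp [h]

theorem inner_gen (seq : List Int) (i : Int) (m : Nat) (him : i = (m : Int))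
    (l : List Nat) (hl : ∀ j ∈ l, j < seq.length) (acc : List Int) :
    l.foldl (fun s (j : Nat) =>
        if PySem.Int.band (@HShiftRight.hShiftRight Int Nat Int Int.instHShiftRightNat i ((j : Int)).toNat) 1 = 1 then
          s ++ (PySem.List.pyGet? seq (j : Int)).toList else s) acc
      = acc ++ (l.filter (fun j => m.testBit j)).map (fun j => seq.getD j 0) := by
  induction l generalizing acc with
  | nil => simp
  | cons a t ih =>
      have ha : a < seq.length := hl a (by simp)
      have ht : ∀ j ∈ t, j < seq.length := fun j hj => hl j (by simp [hj])
      have hget : (PySem.List.pyGet? seq (a : Int)).toList = [seq.getD a 0] := by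
        rw [PySem.List.pyGet?_natCast, List.getElem?_eq_getElem ha, List.getD_eq_getElem _ _ ha]
        rfl
      rw [List.foldl_cons]
      rw [show ((a : Int)).toNat = a from Int.toNat_natCast a]
      by_cases h : m.testBit a
      · rw [if_pos (by rw [him]; exact (bit_cond m a).mpr h), hget, ih ht,
          List.filter_cons_of_pos (by simp [h])]
        simp
      · rw [if_neg (fun hc => h ((bit_cond m a).mp (him ▸ hc))), ih ht,
          List.filter_cons_of_neg (by simp [h])]

theorem inner_eq (seq : List Int) (i : Int) (hi : 0 ≤ i) :
    (PySem.List.pyRange 0 ((seq.length : Int)) 1).foldl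
      (fun s j => if PySem.Int.band (@HShiftRight.hShiftRight Int Nat Int Int.instHShiftRightNat i j.toNat) 1 = 1 then
        s ++ (PySem.List.pyGet? seq j).toList else s)
      ([] : List Int) = subsN seq i.toNat := by
  rw [PySem.List.pyRange_zero_natCast, List.foldl_map]
  rw [inner_gen seq i i.toNat (Int.toNat_of_nonneg hi).symm (List.range seq.length)
    (fun j hj => List.mem_range.mp hj) []]
  rfl

theorem subsN_len_le (seq : List Int) (m : Nat) : (subsN seq m).length ≤ seq.length := by
  rw [subsN, List.length_map]
  exact le_trans (List.length_filter_le _ _) (by rw [List.length_range])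

theorem combinliste_eq (seq : List Int) (k : Int) :
    combinliste seq k =
      ((List.range (2 ^ seq.length)).filter
        (fun m => decide (((subsN seq m).length : Int) = k))).map (subsN seq) := by
  simp only [combinliste]
  rw [PySem.List.foldl_congr_mem _ _ (fun p (i : Int) =>
      if ((subsN seq i.toNat).length : Int) = k then p ++ [subsN seq i.toNat] else p) _ (by
    intro p i hi
    have h0 : 0 ≤ i := (PySem.List.mem_pyRange_one.mp hi).1
    rw [inner_eq seq i h0])]
  rw [show ((2:Int) ^ seq.length : Int) = ((2 ^ seq.length : Nat) : Int) by push_cast; ring]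
  rw [PySem.List.pyRange_zero_natCast, List.foldl_map]
  simp only [Int.toNat_natCast]
  rw [PySem.List.foldl_append_ite (fun m => ((subsN seq m).length : Int) = k) (subsN seq)]
  rw [List.nil_append]

theorem combinliste_neg (seq : List Int) (k : Int) (h : k < 0) : combinliste seq k = [] := by
  rw [combinliste_eq]
  rw [List.filter_eq_nil_iff.mpr (by intro m _; simp; omega)]
  rfl

theorem combinliste_big (seq : List Int) (k : Int) (h : (seq.length : Int) < k) :
    combinliste seq k = [] := by
  rw [combinliste_eq]
  rw [List.filter_eq_nil_iff.mpr ?_]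
  · rfl
  · intro m _
    have := subsN_len_le seq m
    simp
    omega

theorem combinliste_nil (k : Int) : combinliste [] k = if k = 0 then [[]] else [] := by
  rw [combinliste_eq]
  by_cases h : k = 0
  · subst h; decide
  · have h0 : ¬((0:Int) = k) := fun hc => h hc.symm
    simp [List.range_one, h0, h]

theorem subsN_low (seq : List Int) (x : Int) (m : Nat) (hm : m < 2 ^ seq.length) :
    subsN (seq ++ [x]) m = subsN seq m := by
  rw [subsN, subsN, List.length_append, List.length_cons, List.length_nil]
  rw [show (seq.length + (0 + 1)) = seq.length + 1 from rfl, List.range_succ, List.filter_append]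
  rw [List.filter_singleton]
  simp only [Nat.testBit_lt_two_pow hm, cond_false, List.append_nil]
  apply List.map_congr_left
  intro j hj
  have hjl : j < seq.length := List.mem_range.mp (List.mem_of_mem_filter hj)
  rw [List.getD_append _ _ _ _ hjl]

theorem subsN_high (seq : List Int) (x : Int) (m : Nat) (hm : m < 2 ^ seq.length) :
    subsN (seq ++ [x]) (2 ^ seq.length + m) = subsN seq m ++ [x] := by
  rw [subsN, subsN, List.length_append, List.length_cons, List.length_nil]
  rw [show (seq.length + (0 + 1)) = seq.length + 1 from rfl, List.range_succ, List.filter_append]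
  rw [List.filter_singleton]
  simp only [Nat.testBit_two_pow_add_eq, Nat.testBit_lt_two_pow hm, Bool.not_false, cond_true]
  rw [List.map_append]
  congr 1
  · rw [List.filter_congr (p := fun j => (2 ^ seq.length + m).testBit j)
        (q := fun j => m.testBit j) (by
      intro j hj
      have hjl : j < seq.length := List.mem_range.mp hj
      simp [Nat.testBit_two_pow_add_gt hjl])]
    apply List.map_congr_left
    intro j hj
    have hjl : j < seq.length := List.mem_range.mp (List.mem_of_mem_filter hj)
    rw [List.getD_append _ _ _ _ hjl]
  · rw [List.map_singleton]
    congr 1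
    rw [List.getD_eq_getElem?_getD, List.getElem?_concat_length]
    rfl

theorem combinliste_concat (seq : List Int) (x : Int) (k : Int) :
    combinliste (seq ++ [x]) k =
      combinliste seq k ++ (combinliste seq (k - 1)).map (fun c => c ++ [x]) := by
  rw [combinliste_eq (seq ++ [x]) k, combinliste_eq seq k, combinliste_eq seq (k - 1)]
  rw [List.length_append, List.length_cons, List.length_nil]
  rw [show (seq.length + (0 + 1)) = seq.length + 1 from rfl]
  rw [show (2 ^ (seq.length + 1)) = 2 ^ seq.length + 2 ^ seq.length by rw [pow_succ]; omega]
  rw [List.range_add, List.filter_append, List.map_append]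
  congr 1
  · rw [List.filter_congr
        (p := fun m => decide (((subsN (seq ++ [x]) m).length : Int) = k))
        (q := fun m => decide (((subsN seq m).length : Int) = k)) (by
      intro m hm
      simp only [subsN_low seq x m (List.mem_range.mp hm)])]
    apply List.map_congr_left
    intro m hm
    exact subsN_low seq x m (List.mem_range.mp (List.mem_of_mem_filter hm))
  · rw [List.filter_map, List.map_map, List.map_map]
    simp only [Function.comp_def]
    rw [List.filter_congr (p := fun m =>
        decide (((subsN (seq ++ [x]) (2 ^ seq.length + m)).length : Int) = k))
        (q := fun m => decide (((subsN seq m).length : Int) = k - 1)) (by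
      intro m hm
      rw [decide_eq_decide]
      rw [subsN_high seq x m (List.mem_range.mp hm), List.length_append]
      simp
      omega)]
    apply List.map_congr_left
    intro m hm
    have := subsN_high seq x m (List.mem_range.mp (List.mem_of_mem_filter hm))
    simpa using this

theorem combosStep_cons (x : Int) (r0 : List (List Int)) (rest : List (List (List Int))) :
    combosStep x (r0 :: rest) =
      r0 :: List.zipWith (fun prev cur => cur ++ prev.map (fun c => c ++ [x])) (r0 :: rest) rest := rfl

theorem rows_char (seq : List Int) (k : Nat) :
    seq.foldl (fun rows x => combosStep x rows) (([[]] : List (List Int)) :: List.replicate k []) =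
      (List.range (k + 1)).map (fun s : Nat => combinliste seq (s : Int)) := by
  induction seq using List.reverseRecOn with
  | nil =>
      rw [List.foldl_nil, List.range_succ_eq_map, List.map_cons]
      congr 1
      symm
      have hlen : (List.map (fun s : Nat => combinliste [] (s : Int))
          (List.map Nat.succ (List.range k))).length = k := by simp
      conv_rhs => rw [← hlen]
      apply List.eq_replicate_of_mem
      intro b hb
      obtain ⟨s, hs1, hs⟩ := List.mem_map.mp hb
      obtain ⟨t, _, rfl⟩ := List.mem_map.mp hs1
      rw [← hs]
      show combinliste [] ((t + 1 : Nat) : Int) = []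
      rw [combinliste_nil, if_neg (by omega)]
  | append_singleton seq x ih =>
      rw [List.foldl_append, List.foldl_cons, List.foldl_nil, ih]
      rw [List.range_succ_eq_map (n := k), List.map_cons, List.map_cons]
      rw [combosStep_cons]
      have hrows : combinliste seq (((0:Nat)) : Int) ::
          List.map (fun s : Nat => combinliste seq (s : Int)) (List.map Nat.succ (List.range k)) =
          List.map (fun s : Nat => combinliste seq (s : Int)) (List.range (k + 1)) := by
        rw [List.range_succ_eq_map, List.map_cons]
      congr 1
      · have h0 : combinliste seq ((((0:Nat)) : Int) - 1) = [] :=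
          combinliste_neg _ _ (by simp)
        rw [combinliste_concat, h0, List.map_nil, List.append_nil]
      · rw [hrows]
        apply List.ext_getElem
        · simp
        · intro i hi hi'
          have hik : i < k := by simpa using hi'
          simp only [List.getElem_zipWith, List.getElem_map, List.getElem_range]
          rw [combinliste_concat]
          congr 1
          rw [show (((Nat.succ i : Nat)) : Int) - 1 = ((i : Nat) : Int) by
            rw [Nat.succ_eq_add_one]; push_cast; ring]

theorem combos_eq (seq : List Int) (k : Int) : combos seq k = combinliste seq k := by
  rw [combos]
  by_cases h : k < 0 ∨ (seq.length : Int) < k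
  · rw [if_pos h]
    rcases h with h | h
    · rw [combinliste_neg seq k h]
    · rw [combinliste_big seq k h]
  · rw [if_neg h]
    rw [not_or, not_lt, not_lt] at h
    simp only [rows_char]
    rw [List.getD_eq_getElem _ _ (by
      rw [List.length_map, List.length_range]; omega)]
    rw [List.getElem_map, List.getElem_range]
    congr 1
    exact Int.toNat_of_nonneg (by omega)

-- ===== VERDICT (by name: the statement is the Claim_ definition above) =====
theorem clauses_spec : Claim_equal_clauses := by
  intro chiffre i _
  unfold Spec_clauses clauses clauses_alt
  simp only [PySem.List.foldl_append_singleton_eq_map, List.nil_append]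
  rw [combos_eq, combos_eq]
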